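-- pv_equiv track=rewrite | github.com/macximin/mapping-novel | settlement_adapters.py | _normalize_ooxml_path
-- ===== SOURCE A (Python) =====
-- def _normalize_ooxml_path(base_dir: str, target: str) -> str:
--     target = target.replace("\\", "/")
--     if target.startswith("/"):
--         return target.lstrip("/")
--     parts: list[str] = []
--     for part in f"{base_dir}/{target}".split("/"):
--         if part in {"", "."}:
--             continue
--         if part == "..":
--             if parts:
--                 parts.pop()
--             continue
--         parts.append(part)
--     return "/".join(parts)
-- ===== SOURCE B (Python) =====
-- def _normalize_ooxml_path(base_dir: str, target: str) -> str:
--     target = target.replace("\\", "/")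
--     if target.startswith("/"):
--         return target.lstrip("/")
--     res = ""
--     skip = 0
--     for part in reversed((base_dir + "/" + target).split("/")):
--         if part in ("", "."):
--             continue
--         if part == "..":
--             skip += 1
--         elif skip:
--             skip -= 1
--         elif res:
--             res = part + "/" + res
--         else:
--             res = part
--     return res
-- ===== Notes on version B (the rewrite author's own statement) =====
-- stated objective: alternative
-- what changed: Replaces A's forward push/pop stack plus final '/'.join by a single reverse walk over the segments that maintains a pending-'..' integer counter and builds the result string directly by prepending kept names, with no stack, no pop and no join.
import Mathlib
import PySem

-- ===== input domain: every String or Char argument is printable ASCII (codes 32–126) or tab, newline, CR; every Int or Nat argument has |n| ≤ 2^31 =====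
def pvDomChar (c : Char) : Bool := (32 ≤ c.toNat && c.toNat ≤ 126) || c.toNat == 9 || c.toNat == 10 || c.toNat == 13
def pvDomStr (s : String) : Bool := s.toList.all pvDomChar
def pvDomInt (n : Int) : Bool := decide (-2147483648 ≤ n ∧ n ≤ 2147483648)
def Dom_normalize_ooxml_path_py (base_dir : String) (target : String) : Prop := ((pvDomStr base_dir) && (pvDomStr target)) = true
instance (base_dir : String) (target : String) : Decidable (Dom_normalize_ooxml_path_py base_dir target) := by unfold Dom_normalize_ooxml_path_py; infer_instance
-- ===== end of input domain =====

-- B replaces A's forward push/pop stack + final join by a single reverse walk with a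
-- pending-'..' counter that builds the result string directly by prepending (objective: alternative).

-- ===== PORT A =====
-- A's loop body: skip ''/'.'; on '..' pop the stack if nonempty; otherwise push the segment.
def pvStepA (acc : List (List Char)) (part : List Char) : List (List Char) :=
  if part = [] ∨ part = ['.'] then acc
  else if part = ['.', '.'] then (if acc = [] then acc else acc.dropLast)
  else acc ++ [part]

def normalize_ooxml_path_py (base_dir : String) (target : String) : String :=
  let t := PySem.Str.replace target "\\" "/"
  if PySem.Str.startswith t "/" then
    -- target.lstrip("/") with the chars argument "/": drop leading '/' characters (exact)
    String.ofList (t.toList.dropWhile (· == '/'))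
  else
    let parts := PySem.Chars.splitOn (base_dir.toList ++ '/' :: t.toList) ['/']
    String.ofList (PySem.Chars.join ['/'] (parts.foldl pvStepA []))

-- ===== PORT B =====
-- B's for-loop over the reversed segment list, as the obvious structural recursion:
-- state = (pending-'..' counter, result string built so far by prepending).
def pvLoopB : Int → List Char → List (List Char) → List Char
  | _, res, [] => res
  | skip, res, part :: rest =>
    if part = [] ∨ part = ['.'] then pvLoopB skip res rest
    else if part = ['.', '.'] then pvLoopB (skip + 1) res rest
    else if skip ≠ 0 then pvLoopB (skip - 1) res rest
    else if res ≠ [] then pvLoopB skip (part ++ '/' :: res) rest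
    else pvLoopB skip part rest

def normalize_ooxml_path_py_alt (base_dir : String) (target : String) : String :=
  let t := PySem.Str.replace target "\\" "/"
  if PySem.Str.startswith t "/" then
    String.ofList (t.toList.dropWhile (· == '/'))
  else
    let segs := PySem.Chars.splitOn (base_dir.toList ++ '/' :: t.toList) ['/']
    String.ofList (pvLoopB 0 [] segs.reverse)

-- ===== PRECONDITION & SPEC =====
def Spec_normalize_ooxml_path_py (base_dir : String) (target : String) (out : String) : Prop := out = normalize_ooxml_path_py_alt base_dir target
instance (base_dir : String) (target : String) (out : String) : Decidable (Spec_normalize_ooxml_path_py base_dir target out) := by unfold Spec_normalize_ooxml_path_py; infer_instance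

-- ===== CLAIM (what is proved, stated in full; the proofs are below) =====
def Claim_equal_normalize_ooxml_path_py : Prop := ∀ (base_dir : String) (target : String), Dom_normalize_ooxml_path_py base_dir target → Spec_normalize_ooxml_path_py base_dir target (normalize_ooxml_path_py base_dir target)

-- ===== LEMMAS AND PROOFS =====

-- Proof-side abstraction of the reverse walk: counter plus the KEPT names (appended in
-- processing order, so .2.reverse is the original order).
def pvStepB (st : Int × List (List Char)) (part : List Char) : Int × List (List Char) :=
  if part = [] ∨ part = ['.'] then st
  else if part = ['.', '.'] then (st.1 + 1, st.2)
  else if st.1 ≠ 0 then (st.1 - 1, st.2)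
  else (st.1, st.2 ++ [part])

def pvR (l : List (List Char)) : Int × List (List Char) :=
  l.foldr (fun p st => pvStepB st p) ((0 : Int), [])

theorem pvR_nonneg (l : List (List Char)) : 0 ≤ (pvR l).1 := by
  induction l with
  | nil => simp [pvR]
  | cons p l ih =>
    have hR : pvR (p :: l) = pvStepB (pvR l) p := rfl
    rw [hR]; unfold pvStepB
    split_ifs
    all_goals try dsimp only
    all_goals omega

-- Invariant: A's forward fold from any stack s equals s with the pending '..'-count
-- of the tail removed, followed by the kept names.
theorem pvA_eq (l : List (List Char)) : ∀ s : List (List Char),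
    l.foldl pvStepA s = s.take (s.length - (pvR l).1.toNat) ++ (pvR l).2.reverse := by
  induction l with
  | nil => intro s; simp [pvR]
  | cons p l ih =>
    intro s
    have hk := pvR_nonneg l
    have hR : pvR (p :: l) = pvStepB (pvR l) p := rfl
    rw [List.foldl_cons, hR]
    by_cases h1 : p = [] ∨ p = ['.']
    · simp only [pvStepA, pvStepB, if_pos h1]
      exact ih s
    · by_cases h2 : p = ['.', '.']
      · simp only [pvStepA, pvStepB, if_neg h1, if_pos h2]
        rw [ih]
        have hd : (if s = [] then s else s.dropLast) = s.dropLast := by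
          split <;> simp_all
        rw [hd, List.dropLast_eq_take, List.take_take, List.length_take]
        try dsimp only
        congr 2
        omega
      · by_cases h3 : (pvR l).1 ≠ 0
        · simp only [pvStepA, pvStepB, if_neg h1, if_neg h2, if_pos h3]
          rw [ih]
          try dsimp only
          rw [List.length_append,
            List.take_append_of_le_length (by simp; omega)]
          congr 2
          simp only [List.length_singleton]
          omega
        · have h0 : (pvR l).1 = 0 := by omega
          simp only [pvStepA, pvStepB, if_neg h1, if_neg h2, if_neg h3]
          rw [ih]
          try dsimp only
          simp [h0, List.take_of_length_le]

theorem pvJoin_ne {ns : List (List Char)} (h : ∀ x ∈ ns, x ≠ []) (hns : ns ≠ []) :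
    PySem.Chars.join ['/'] ns ≠ [] := by
  cases ns with
  | nil => exact absurd rfl hns
  | cons a t =>
    cases t with
    | nil =>
      rw [PySem.Chars.join_singleton]
      exact h a (by simp)
    | cons b u =>
      rw [PySem.Chars.join_cons_cons]
      simp

-- B's recursion computes the '/'-join of the kept names of the reverse of its input.
theorem pvB_eq (m : List (List Char)) : ∀ (k : Int) (ns : List (List Char)),
    (∀ x ∈ ns, x ≠ []) →
    pvLoopB k (PySem.Chars.join ['/'] ns.reverse) m =
      PySem.Chars.join ['/'] (m.foldl pvStepB (k, ns)).2.reverse := by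
  induction m with
  | nil => intro k ns _; simp [pvLoopB]
  | cons p rest ih =>
    intro k ns hns
    rw [List.foldl_cons]
    simp only [pvLoopB]
    by_cases h1 : p = [] ∨ p = ['.']
    · have hs : pvStepB (k, ns) p = (k, ns) := by simp [pvStepB, h1]
      rw [if_pos h1, hs]; exact ih k ns hns
    · rw [if_neg h1]
      by_cases h2 : p = ['.', '.']
      · have hs : pvStepB (k, ns) p = (k + 1, ns) := by simp [pvStepB, h2]
        rw [if_pos h2, hs]; exact ih (k + 1) ns hns
      · rw [if_neg h2]
        by_cases h3 : k ≠ 0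
        · have hs : pvStepB (k, ns) p = (k - 1, ns) := by simp [pvStepB, h1, h2, h3]
          rw [if_pos h3, hs]; exact ih (k - 1) ns hns
        · have hs : pvStepB (k, ns) p = (k, ns ++ [p]) := by simp [pvStepB, h1, h2, h3]
          rw [if_neg h3, hs]
          have hp : p ≠ [] := fun hc => h1 (Or.inl hc)
          have hns' : ∀ x ∈ ns ++ [p], x ≠ [] := by
            intro x hx
            rcases List.mem_append.1 hx with h | h
            · exact hns x h
            · simp only [List.mem_singleton] at h; subst h; exact hp
          by_cases h4 : ns = []
          · subst h4
            rw [if_neg (show ¬ PySem.Chars.join ['/'] (List.reverse ([] : List (List Char))) ≠ [] by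
              simp [PySem.Chars.join_nil])]
            have := ih k ([] ++ [p]) hns'
            simpa [PySem.Chars.join_singleton] using this
          · have hrev : ns.reverse ≠ [] := by simpa using h4
            have hjoin : PySem.Chars.join ['/'] ns.reverse ≠ [] :=
              pvJoin_ne (by intro x hx; exact hns x (List.mem_reverse.1 hx)) hrev
            rw [if_pos hjoin]
            have heq : p ++ '/' :: PySem.Chars.join ['/'] ns.reverse =
                PySem.Chars.join ['/'] ((ns ++ [p]).reverse) := by
              rw [List.reverse_append]
              cases hrv : ns.reverse with
              | nil => exact absurd hrv hrev
              | cons b u =>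
                simp only [List.reverse_singleton, List.singleton_append]
                rw [PySem.Chars.join_cons_cons]
                simp
            rw [heq]
            exact ih k (ns ++ [p]) hns'

-- ===== VERDICT (by name: the statement is the Claim_ definition above) =====
theorem normalize_ooxml_path_py_spec : Claim_equal_normalize_ooxml_path_py := by
  intro base_dir target _
  unfold Spec_normalize_ooxml_path_py normalize_ooxml_path_py normalize_ooxml_path_py_alt
  simp only []
  split
  · rfl
  · set segs := PySem.Chars.splitOn (base_dir.toList ++ '/' :: (PySem.Str.replace target "\\" "/").toList) ['/'] with hsegs
    have hA := pvA_eq segs []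
    simp only [List.length_nil, Nat.zero_sub, List.take_zero, List.nil_append] at hA
    have hB := pvB_eq segs.reverse 0 [] (by simp)
    simp only [List.reverse_nil, PySem.Chars.join_nil] at hB
    rw [hA, hB]
    congr 2
    rw [pvR, ← List.foldl_reverse]
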